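-- pv_equiv track=rewrite | github.com/Crazytieguy/advent-of-code | 2023/python/day14/main.py | find_last_grid
-- ===== SOURCE A (Python) =====
-- def roll_start(row: str) -> str:
--     new_row = []
--     for i, c in enumerate(row):
--         if c == "O":
--             new_row.append("O")
--         if c == "#":
--             new_row.extend("." * (i - len(new_row)))
--             new_row.append("#")
--     new_row.extend("." * (len(row) - len(new_row)))
--     return "".join(new_row)
--
-- def cycle(grid: list[str]) -> list[str]:
--     # grid starts north -> south x west -> east
--     # tilt north
--     grid = [roll_start("".join(row)) for row in zip(*grid)]
--     grid = ["".join(row) for row in zip(*grid)]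
--     # tilt west
--     grid = [roll_start(row) for row in grid]
--     # tilt south
--     grid = [roll_start("".join(reversed(row))) for row in zip(*grid)]
--     grid = ["".join(row) for row in zip(*grid)][::-1]
--     # tilt east
--     grid = ["".join(reversed(roll_start("".join(reversed(row))))) for row in grid]
--     return grid
--
-- def find_last_grid(initial_grid: list[str]) -> list[str]:
--     grid_history = [initial_grid]
--     for cycles in range(1000):
--         new_grid = cycle(grid_history[-1])
--         for i, grid in enumerate(grid_history):
--             if grid == new_grid:
--                 start = i
--                 length = cycles + 1 - i
--                 offset = (1_000_000_000 - start) % length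
--                 return grid_history[start + offset]
--         grid_history.append(new_grid)
--     raise RuntimeError("No match found")
-- ===== SOURCE B (Python) =====
-- def roll_start(row: str) -> str:
--     new_row = []
--     for i, c in enumerate(row):
--         if c == "O":
--             new_row.append("O")
--         if c == "#":
--             new_row.extend("." * (i - len(new_row)))
--             new_row.append("#")
--     new_row.extend("." * (len(row) - len(new_row)))
--     return "".join(new_row)
--
-- def cycle(grid: list[str]) -> list[str]:
--     # grid starts north -> south x west -> east
--     # tilt north
--     grid = [roll_start("".join(row)) for row in zip(*grid)]
--     grid = ["".join(row) for row in zip(*grid)]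
--     # tilt west
--     grid = [roll_start(row) for row in grid]
--     # tilt south
--     grid = [roll_start("".join(reversed(row))) for row in zip(*grid)]
--     grid = ["".join(row) for row in zip(*grid)][::-1]
--     # tilt east
--     grid = ["".join(reversed(roll_start("".join(reversed(row))))) for row in grid]
--     return grid
--
-- def find_last_grid(initial_grid: list[str]) -> list[str]:
--     # Hash-indexed cycle detection: a dict mapping each seen state to its step
--     # number replaces A's history list and inner linear scan; the answer is
--     # re-simulated from the initial grid instead of looked up in a stored history.
--     seen = {}
--     g = initial_grid
--     steps = 0
--     while tuple(g) not in seen: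
--         if steps == 1000:
--             raise RuntimeError("No match found")
--         seen[tuple(g)] = steps
--         g = cycle(g)
--         steps += 1
--     mu = seen[tuple(g)]
--     lam = steps - mu
--     k = mu + (1_000_000_000 - mu) % lam
--     out = initial_grid
--     for _ in range(k):
--         out = cycle(out)
--     return out
-- ===== Notes on version B (the rewrite author's own statement) =====
-- stated objective: alternative
-- what changed: B detects the cycle with a dict mapping each seen grid state to its step number (replacing A's history list with its inner linear scan over all stored grids) and re-simulates the answer for mu + (1e9 - mu) % lam steps from the initial grid instead of indexing a stored history.
import Mathlib
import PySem

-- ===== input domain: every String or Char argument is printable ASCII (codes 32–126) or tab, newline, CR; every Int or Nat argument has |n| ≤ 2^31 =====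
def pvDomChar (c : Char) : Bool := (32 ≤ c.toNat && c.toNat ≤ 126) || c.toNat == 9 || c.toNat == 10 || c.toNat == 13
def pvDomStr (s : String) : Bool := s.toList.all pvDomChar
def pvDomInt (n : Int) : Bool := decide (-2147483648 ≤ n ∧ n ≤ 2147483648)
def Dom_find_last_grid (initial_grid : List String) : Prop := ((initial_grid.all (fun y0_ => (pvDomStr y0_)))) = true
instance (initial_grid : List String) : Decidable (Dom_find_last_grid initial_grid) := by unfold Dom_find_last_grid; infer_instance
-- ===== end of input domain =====

-- B replaces A's stored-history inner linear scan by a hash-indexed (dict) cycle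
-- detection and re-simulates the answer from the initial grid; equal on Pre_ (alternative).


-- ===== PORT A =====
-- roll_start on the character list (roll_start(row) = String.mk (rollChars row.toList))
def rollChars (row : List Char) : List Char :=
  let nr := (PySem.List.enumerate row).foldl
    (fun nr p =>
      let nr := if p.2 = 'O' then nr ++ ['O'] else nr
      -- "." * (i - len(new_row)): a negative count gives the empty string, as .toNat does
      if p.2 = '#' then (nr ++ List.replicate (p.1 - (nr.length : Int)).toNat '.') ++ ['#'] else nr)
    []
  nr ++ List.replicate (row.length - nr.length) '.'

def roll_start (row : String) : String := String.ofList (rollChars row.toList)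

-- zip(*grid): columns, truncated to the shortest row (empty for zero rows)
def pyZipStar (rows : List (List Char)) : List (List Char) :=
  match (rows.map List.length).min? with
  | none => []
  | some n => (List.range n).map (fun i => rows.map (fun r => r.getD i ' '))

def cycleG (grid : List String) : List String :=
  -- tilt north
  let g1 := (pyZipStar (grid.map String.toList)).map (fun row => roll_start (String.ofList row))
  let g2 := (pyZipStar (g1.map String.toList)).map String.ofList
  -- tilt west
  let g3 := g2.map roll_start
  -- tilt south
  let g4 := (pyZipStar (g3.map String.toList)).map
    (fun row => roll_start (String.ofList row.reverse))
  let g5 := ((pyZipStar (g4.map String.toList)).map String.ofList).reverse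
  -- tilt east
  g5.map (fun r => String.ofList (roll_start (String.ofList r.toList.reverse)).toList.reverse)

-- the loop `for cycles in range(1000)`: fuel = 1000 - cycles remaining iterations;
-- none = the RuntimeError path (excluded by Pre_)
def findA_loop : Nat → List (List String) → Nat → Option (List String)
  | 0, _, _ => none
  | fuel + 1, hist, cycles =>
    let new_grid := cycleG (PySem.List.pyGetD hist (-1) [])
    match (PySem.List.enumerate hist).find? (fun p => p.2 == new_grid) with
    | some p =>
        let start : Int := p.1
        let length : Int := (cycles : Int) + 1 - start
        let offset : Int := PySem.Int.mod (1000000000 - start) length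
        PySem.List.pyGet? hist (start + offset)
    | none => findA_loop fuel (hist ++ [new_grid]) (cycles + 1)

def find_last_grid (initial_grid : List String) : List String :=
  (findA_loop 1000 [initial_grid] 0).getD []

-- ===== PORT B =====
-- the while loop: seen maps each state to its step number; fuel = 1000 - steps, so
-- fuel = 0 is Python's `steps == 1000` raise; none = the RuntimeError path.
def findB_loop : Nat → PySem.Dict (List String) Nat → List String → Nat → Option (Nat × Nat)
  | fuel, seen, g, steps =>
    match seen.get? g with
    | some mu => some (mu, steps)
    | none =>
      match fuel with
      | 0 => none
      | fuel + 1 => findB_loop fuel (seen.insert g steps) (cycleG g) (steps + 1)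

def find_last_grid_alt (initial_grid : List String) : List String :=
  match findB_loop 1000 PySem.Dict.empty initial_grid 0 with
  | none => []
  | some (mu, steps) =>
    let lam := steps - mu
    let k := mu + (1000000000 - mu) % lam
    (List.range k).foldl (fun out _ => cycleG out) initial_grid

-- ===== PRECONDITION & SPEC =====
-- Pre_ excludes exactly the inputs on which both Pythons raise RuntimeError: those whose
-- cycle-trajectory does not revisit an earlier state within the first 1000 steps.
def Pre_find_last_grid (initial_grid : List String) : Prop :=
  ∃ n ≤ 1000, ∃ i < n, cycleG^[i] initial_grid = cycleG^[n] initial_grid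

-- [s, s+1, …, s+fuel], consed front-first: only used by the Decidable instance below,
-- so that deciding Pre_ can stop at the first revisit instead of recursing 1000 deep
def upFrom : Nat → Nat → List Nat
  | s, 0 => [s]
  | s, fuel+1 => s :: upFrom (s+1) fuel

theorem mem_upFrom : ∀ (fuel s n : Nat), n ∈ upFrom s fuel ↔ s ≤ n ∧ n ≤ s + fuel := by
  intro fuel
  induction fuel with
  | zero => intro s n; simp [upFrom]; omega
  | succ f ih => intro s n; simp [upFrom, ih]; omega

instance (initial_grid : List String) : Decidable (Pre_find_last_grid initial_grid) :=
  decidable_of_iff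
    (∃ n ∈ upFrom 0 1000, ∃ i ∈ upFrom 0 n,
      i < n ∧ cycleG^[i] initial_grid = cycleG^[n] initial_grid) (by
    unfold Pre_find_last_grid
    constructor
    · rintro ⟨n, hn, i, _, hi, he⟩
      exact ⟨n, ((mem_upFrom 1000 0 n).mp hn).2, i, hi, he⟩
    · rintro ⟨n, hn, i, hi, he⟩
      exact ⟨n, (mem_upFrom 1000 0 n).mpr ⟨Nat.zero_le _, hn⟩,
        i, (mem_upFrom n 0 i).mpr ⟨Nat.zero_le _, by omega⟩, hi, he⟩)

def pvWitness_find_last_grid : List String := []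

def Spec_find_last_grid (initial_grid : List String) (out : List String) : Prop :=
  out = find_last_grid_alt initial_grid
instance (initial_grid : List String) (out : List String) :
    Decidable (Spec_find_last_grid initial_grid out) := by
  unfold Spec_find_last_grid; infer_instance

-- ===== CLAIM (what is proved, stated in full; the proofs are below) =====
def Claim_equal_find_last_grid : Prop :=
  ∀ (initial_grid : List String), Dom_find_last_grid initial_grid →
    Pre_find_last_grid initial_grid →
    Spec_find_last_grid initial_grid (find_last_grid initial_grid)

-- ===== LEMMAS AND PROOFS =====

theorem foldl_range_cycleG (g : List String) (k : Nat) :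
    (List.range k).foldl (fun out _ => cycleG out) g = cycleG^[k] g := by
  induction k with
  | zero => rfl
  | succ n ih =>
      rw [List.range_succ, List.foldl_append, ih, List.foldl_cons, List.foldl_nil,
        Function.iterate_succ_apply']

-- hist[-1] of the history (range (c+1)).map f is f c
theorem pyGetD_neg_one_range_map (f : Nat → List String) (c : Nat) (d : List String) :
    PySem.List.pyGetD ((List.range (c+1)).map f) (-1) d = f c := by
  rw [List.range_succ, List.map_append]
  exact PySem.List.pyGetD_neg_one_append_singleton _ _ _

-- A's loop on the history of iterates: it returns the grid at index μ + (10⁹ − μ) % (N − μ)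
theorem A_loop_eq (g : List String) (N μ : Nat)
    (hμN : μ < N) (hμeq : cycleG^[μ] g = cycleG^[N] g)
    (hdist : ∀ i j : Nat, i < j → j < N → cycleG^[i] g ≠ cycleG^[j] g)
    (hμmin : ∀ i : Nat, i < μ → cycleG^[i] g ≠ cycleG^[N] g)
    (hN : N ≤ 1000) :
    ∀ (d c : Nat), N - 1 - c = d → c < N →
      findA_loop (1000 - c) ((List.range (c+1)).map (fun k => cycleG^[k] g)) c
        = some (cycleG^[μ + (1000000000 - μ) % (N - μ)] g) := by
  intro d
  induction d with
  | zero =>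
    intro c hd hc
    have hc1 : c + 1 = N := by omega
    have hμc : μ < c + 1 := by omega
    have hμeqc : cycleG^[μ] g = cycleG^[c+1] g := by rw [hc1]; exact hμeq
    have hμminc : ∀ j : Nat, j < μ → cycleG^[j] g ≠ cycleG^[c+1] g := by
      intro j hj; rw [hc1]; exact hμmin j hj
    rw [show 1000 - c = (1000 - c - 1) + 1 by omega]
    simp only [findA_loop, pyGetD_neg_one_range_map,
      ← Function.iterate_succ_apply' cycleG c g]
    have hfind : (PySem.List.enumerate ((List.range (c+1)).map (fun k => cycleG^[k] g))).find?
        (fun p => p.2 == cycleG^[c+1] g) = some ((μ : Int), cycleG^[μ] g) := by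
      rw [List.find?_eq_some_iff_getElem]
      refine ⟨by simpa using hμeqc, μ, ?_, ?_, ?_⟩
      · rw [PySem.List.length_enumerate, List.length_map, List.length_range]; exact hμc
      · rw [PySem.List.getElem_enumerate]
        simp only [List.getElem_map, List.getElem_range]
        norm_num
      · intro j hj
        rw [PySem.List.getElem_enumerate]
        simp only [List.getElem_map, List.getElem_range, Bool.not_eq_true', beq_eq_false_iff_ne,
          ne_eq]
        exact hμminc j hj
    rw [hfind]
    dsimp only
    have harith : ((μ : Int)) + PySem.Int.mod (1000000000 - (μ : Int)) ((c : Int) + 1 - (μ : Int))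
        = ((μ + (1000000000 - μ) % (N - μ) : Nat) : Int) := by
      rw [show (1000000000 - (μ : Int)) = ((1000000000 - μ : Nat) : Int) by omega,
        show ((c : Int) + 1 - (μ : Int)) = ((N - μ : Nat) : Int) by omega,
        PySem.Int.mod_natCast]
      omega
    have hKlt : μ + (1000000000 - μ) % (N - μ) < c + 1 := by
      have : (1000000000 - μ) % (N - μ) < N - μ := Nat.mod_lt _ (by omega)
      omega
    rw [harith, PySem.List.pyGet?_ofNat _ _ (by
      rw [List.length_map, List.length_range]; exact hKlt)]
    simp only [List.getElem_map, List.getElem_range]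
  | succ d ih =>
    intro c hd hc
    have hcN : c + 1 < N := by omega
    rw [show 1000 - c = (1000 - c - 1) + 1 by omega]
    simp only [findA_loop, pyGetD_neg_one_range_map, ← Function.iterate_succ_apply' cycleG c g]
    have hfind : (PySem.List.enumerate ((List.range (c+1)).map (fun k => cycleG^[k] g))).find?
        (fun p => p.2 == cycleG^[c+1] g) = none := by
      rw [List.find?_eq_none]
      intro p hp
      rw [PySem.List.mem_enumerate_iff] at hp
      obtain ⟨k, hk, rfl⟩ := hp
      have hk' : k < c + 1 := by
        rw [List.length_map, List.length_range] at hk; exact hk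
      simp only [List.getElem_map, List.getElem_range, beq_iff_eq]
      exact hdist k (c+1) hk' hcN
    rw [hfind]
    rw [show ((List.range (c+1)).map (fun k => cycleG^[k] g)) ++ [cycleG^[c+1] g]
        = (List.range (c+1+1)).map (fun k => cycleG^[k] g) by
      rw [List.range_succ (n := c+1), List.map_append]; rfl]
    rw [show 1000 - c - 1 = 1000 - (c+1) by omega]
    exact ih (c+1) (by omega) hcN

-- B's loop: with seen holding exactly the first s iterates, it returns (μ, N)
theorem B_loop_eq (g : List String) (N μ : Nat)
    (hμN : μ < N) (hμeq : cycleG^[μ] g = cycleG^[N] g)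
    (hdist : ∀ i j : Nat, i < j → j < N → cycleG^[i] g ≠ cycleG^[j] g)
    (hN : N ≤ 1000) :
    ∀ (d s : Nat) (seen : PySem.Dict (List String) Nat), N - s = d → s ≤ N →
      seen.items = (List.range s).map (fun i => (cycleG^[i] g, i)) →
      findB_loop (1000 - s) seen (cycleG^[s] g) s = some (μ, N) := by
  have hkeys : ∀ (s : Nat) (seen : PySem.Dict (List String) Nat),
      s ≤ N → seen.items = (List.range s).map (fun i => (cycleG^[i] g, i)) →
      seen.keys = (List.range s).map (fun i => cycleG^[i] g) := by
    intro s seen hs hitems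
    simp only [PySem.Dict.keys, hitems, List.map_map]
    rfl
  have hnodup : ∀ (s : Nat), s ≤ N → ((List.range s).map (fun i => cycleG^[i] g)).Nodup := by
    intro s hs
    refine List.Nodup.map_on ?_ (List.nodup_range)
    intro i hi j hj hfeq
    rw [List.mem_range] at hi hj
    by_contra hne
    rcases Nat.lt_or_ge i j with h | h
    · exact hdist i j h (by omega) hfeq
    · exact hdist j i (by omega) (by omega) hfeq.symm
  intro d
  induction d with
  | zero =>
    intro s seen hd hs hitems
    have hsN : s = N := by omega
    subst hsN
    have hget : seen.get? (cycleG^[s] g) = some μ := by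
      rw [← hμeq]
      exact PySem.Dict.get?_of_mem_items seen
        (by rw [hitems]; exact List.mem_map.mpr ⟨μ, List.mem_range.mpr hμN, rfl⟩)
        (by rw [hkeys s seen hs hitems]; exact hnodup s hs)
    rw [findB_loop.eq_def]
    dsimp only
    rw [hget]
  | succ d ih =>
    intro s seen hd hs hitems
    have hsN : s < N := by omega
    have hmem : cycleG^[s] g ∉ seen.keys := by
      rw [hkeys s seen hs hitems]
      intro hmem
      obtain ⟨i, hi, heq⟩ := List.mem_map.mp hmem
      exact hdist i s (List.mem_range.mp hi) hsN heq
    have hget : seen.get? (cycleG^[s] g) = none :=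
      (PySem.Dict.get?_eq_none_iff_not_mem_keys seen _).mpr hmem
    have hcont : seen.contains (cycleG^[s] g) = false := by
      by_contra h
      exact hmem ((PySem.Dict.contains_iff_mem_keys seen _).mp (by simpa using h))
    rw [show 1000 - s = (1000 - (s+1)) + 1 by omega]
    rw [findB_loop.eq_def]
    dsimp only
    rw [hget]
    dsimp only
    rw [← Function.iterate_succ_apply' cycleG s g]
    exact ih (s+1) (seen.insert (cycleG^[s] g) s) (by omega) (by omega)
      (by rw [PySem.Dict.items_insert_of_not_contains seen s hcont, hitems,
        List.range_succ, List.map_append]; rfl)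

-- ===== VERDICT (by name: the statement is the Claim_ definition above) =====
theorem find_last_grid_spec : Claim_equal_find_last_grid := by
  intro g _hDom hPre
  unfold Spec_find_last_grid
  obtain ⟨n0, hn0', i0, hi0, heq0⟩ := hPre
  have hEx : ∃ n : Nat, ∃ i : Nat, i < n ∧ cycleG^[i] g = cycleG^[n] g := ⟨n0, i0, hi0, heq0⟩
  set N := Nat.find hEx with hNdef
  have hNspec : ∃ i : Nat, i < N ∧ cycleG^[i] g = cycleG^[N] g := Nat.find_spec hEx
  set μ := Nat.find hNspec with hμdef
  obtain ⟨hμN, hμeq⟩ : μ < N ∧ cycleG^[μ] g = cycleG^[N] g := Nat.find_spec hNspec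
  have hμmin : ∀ i : Nat, i < μ → cycleG^[i] g ≠ cycleG^[N] g := by
    intro i hi hcon
    exact Nat.find_min hNspec hi ⟨by omega, hcon⟩
  have hdist : ∀ i j : Nat, i < j → j < N → cycleG^[i] g ≠ cycleG^[j] g := by
    intro i j hij hj hcon
    exact Nat.find_min hEx hj ⟨i, hij, hcon⟩
  have hN : N ≤ 1000 := le_trans (Nat.find_le ⟨i0, hi0, heq0⟩) hn0'
  have hA : find_last_grid g = cycleG^[μ + (1000000000 - μ) % (N - μ)] g := by
    unfold find_last_grid
    rw [show (1000 : Nat) = 1000 - 0 by omega,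
      show ([g] : List (List String)) = (List.range (0+1)).map (fun k => cycleG^[k] g) by simp]
    rw [A_loop_eq g N μ hμN hμeq hdist hμmin hN (N - 1 - 0) 0 rfl (by omega)]
    rfl
  have hB : find_last_grid_alt g = cycleG^[μ + (1000000000 - μ) % (N - μ)] g := by
    unfold find_last_grid_alt
    rw [show (1000 : Nat) = 1000 - 0 by omega,
      show g = cycleG^[0] g from (Function.iterate_zero_apply cycleG g).symm]
    rw [B_loop_eq g N μ hμN hμeq hdist hN (N - 0) 0 PySem.Dict.empty rfl (by omega) (by rfl)]
    dsimp only
    rw [foldl_range_cycleG]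
  rw [hA, hB]
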